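-- pv_equiv track=rewrite | github.com/jonathangu/openclawbrain | openclawbrain/openclaw_adapter/query_brain.py | _expand_recent_memory_files
-- ===== SOURCE A (Python) =====
-- def _expand_recent_memory_files(values: list[str]) -> list[str]:
--     expanded: list[str] = []
--     seen: set[str] = set()
--     for raw in values:
--         value = raw.strip()
--         if not value:
--             continue
--         candidates = [value]
--         if "/" not in value:
--             candidates.append(f"memory/{value}")
--         for candidate in candidates:
--             if candidate not in seen:
--                 seen.add(candidate)
--                 expanded.append(candidate)
--     return expanded
-- ===== SOURCE B (Python) =====
-- def _expand_recent_memory_files(values: list[str]) -> list[str]: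
--     # Fold the input back-to-front: each non-empty stripped value prepends its
--     # head candidates and filters them out of the already-built suffix result,
--     # so first occurrences win without any seen-set.
--     result: list[str] = []
--     for raw in reversed(values):
--         value = raw.strip()
--         if not value:
--             continue
--         head = [value] if "/" in value else [value, "memory/" + value]
--         result = head + [x for x in result if x not in head]
--     return result
-- ===== Notes on version B (the rewrite author's own statement) =====
-- stated objective: alternative
-- what changed: B traverses the list back-to-front with no seen set: each kept value prepends its candidates and filters them out of the suffix result already built (a right fold with filtering), instead of A's forward loop appending candidates guarded by a growing seen set.
import Mathlib
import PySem

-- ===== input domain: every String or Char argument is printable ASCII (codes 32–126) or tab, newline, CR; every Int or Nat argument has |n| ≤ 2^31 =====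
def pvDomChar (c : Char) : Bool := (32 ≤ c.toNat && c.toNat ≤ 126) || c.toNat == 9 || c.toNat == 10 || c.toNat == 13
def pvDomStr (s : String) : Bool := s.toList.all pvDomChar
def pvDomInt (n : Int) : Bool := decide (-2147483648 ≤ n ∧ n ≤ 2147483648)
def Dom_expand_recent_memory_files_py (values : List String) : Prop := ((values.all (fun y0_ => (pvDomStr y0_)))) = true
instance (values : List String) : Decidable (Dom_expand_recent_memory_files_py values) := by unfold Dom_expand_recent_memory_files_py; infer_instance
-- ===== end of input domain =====

-- B folds the list back-to-front with no seen set: each kept value prepends its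
-- candidates and filters them out of the suffix result already built (alternative).

-- ===== PORT A =====
def expand_recent_memory_files_py (values : List String) : List String :=
  (values.foldl
    (fun (st : List String × PySem.Set String) raw =>
      let value := PySem.Str.strip raw
      if value = "" then st
      else
        let candidates := [value] ++ (if PySem.Str.isIn "/" value then [] else ["memory/" ++ value])
        candidates.foldl
          (fun (st : List String × PySem.Set String) candidate =>
            if st.2.contains candidate then st
            else (st.1 ++ [candidate], PySem.Set.add st.2 candidate)) st)
    ([], PySem.Set.empty)).1

-- ===== PORT B =====
def expand_recent_memory_files_py_alt (values : List String) : List String :=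
  values.foldr
    (fun raw result =>
      let value := PySem.Str.strip raw
      if value = "" then result
      else
        let head := if PySem.Str.isIn "/" value then [value] else [value, "memory/" ++ value]
        head ++ result.filter (fun x => !head.contains x))
    []

-- ===== PRECONDITION & SPEC =====
def Spec_expand_recent_memory_files_py (values : List String) (out : List String) : Prop := out = expand_recent_memory_files_py_alt values
instance (values : List String) (out : List String) : Decidable (Spec_expand_recent_memory_files_py values out) := by unfold Spec_expand_recent_memory_files_py; infer_instance

-- ===== CLAIM (what is proved, stated in full; the proofs are below) =====
def Claim_equal_expand_recent_memory_files_py : Prop := ∀ (values : List String), Dom_expand_recent_memory_files_py values → Spec_expand_recent_memory_files_py values (expand_recent_memory_files_py values)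

-- ===== LEMMAS AND PROOFS =====

-- the candidate list a single raw value contributes (empty after strip ⇒ nothing)
def pvCand (raw : String) : List String :=
  let value := PySem.Str.strip raw
  if value = "" then []
  else [value] ++ (if PySem.Str.isIn "/" value then [] else ["memory/" ++ value])

-- first-occurrence dedup, computed by filtering the tail's dedup (B's mechanism)
def pvNub : List String → List String
  | [] => []
  | c :: cs => c :: (pvNub cs).filter (fun x => x ≠ c)

-- A's inner loop from a diagonal state (s, s) is Set.update
lemma pv_inner (cs : List String) (s : PySem.Set String) :
    cs.foldl
      (fun (st : List String × PySem.Set String) candidate =>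
        if st.2.contains candidate then st
        else (st.1 ++ [candidate], PySem.Set.add st.2 candidate)) (s, s)
      = (PySem.Set.update s cs, PySem.Set.update s cs) := by
  induction cs generalizing s with
  | nil => simp [PySem.Set.update]
  | cons c cs ih =>
    simp only [List.foldl_cons, PySem.Set.update_cons]
    by_cases h : s.contains c = true
    · rw [if_pos h]
      have ha : PySem.Set.add s c = s := PySem.Set.add_of_mem ((List.mem_of_elem_eq_true h))
      rw [ha]
      exact ih s
    · rw [if_neg h]
      have ha : PySem.Set.add s c = s ++ [c] := PySem.Set.add_of_not_mem (fun hm => h (List.elem_eq_true_of_mem hm))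
      rw [show s ++ [c] = PySem.Set.add s c from ha.symm]
      exact ih (PySem.Set.add s c)

-- A's outer loop from a diagonal state is Set.update by the flattened candidates
lemma pv_outer (values : List String) (s : PySem.Set String) :
    values.foldl
      (fun (st : List String × PySem.Set String) raw =>
        let value := PySem.Str.strip raw
        if value = "" then st
        else
          let candidates := [value] ++ (if PySem.Str.isIn "/" value then [] else ["memory/" ++ value])
          candidates.foldl
            (fun (st : List String × PySem.Set String) candidate =>
              if st.2.contains candidate then st
              else (st.1 ++ [candidate], PySem.Set.add st.2 candidate)) st) (s, s)
      = (PySem.Set.update s (values.flatMap pvCand), PySem.Set.update s (values.flatMap pvCand)) := by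
  induction values generalizing s with
  | nil => simp [PySem.Set.update]
  | cons raw rest ih =>
    simp only [List.foldl_cons, List.flatMap_cons, PySem.Set.update_append]
    by_cases h : PySem.Str.strip raw = ""
    · simp only [pvCand, h, if_pos]
      simpa using ih s
    · simp only [pvCand, h, if_neg, not_false_iff]
      rw [pv_inner]
      exact ih _

-- Set.update (A's dedup-by-seen-set) equals nub-then-filter
lemma pv_update_nub (cs : List String) (s : List String) :
    PySem.Set.update s cs = s ++ (pvNub cs).filter (fun x => !s.contains x) := by
  induction cs generalizing s with
  | nil => simp [PySem.Set.update, pvNub]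
  | cons c cs ih =>
    rw [PySem.Set.update_cons]
    by_cases h : s.contains c = true
    · have ha : PySem.Set.add s c = s := PySem.Set.add_of_mem ((List.mem_of_elem_eq_true h))
      rw [ha, ih]
      simp only [pvNub, List.filter_cons, h, Bool.not_true, List.filter_filter]
      congr 1
      apply List.filter_congr
      intro x _
      by_cases hx : x = c
      · subst hx; simp; exact List.mem_of_elem_eq_true h
      · simp [hx]
    · have ha : PySem.Set.add s c = s ++ [c] := PySem.Set.add_of_not_mem (fun hm => h (List.elem_eq_true_of_mem hm))
      rw [ha, ih]
      simp only [pvNub, List.filter_cons, h, Bool.not_false, List.filter_filter, List.append_assoc,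
        List.singleton_append]
      congr 2
      apply List.filter_congr
      intro x _
      by_cases hx : x = c
      · subst hx; simp
      · simp [hx]

-- B computes pvNub of the flattened candidate list
lemma pv_B (values : List String) :
    expand_recent_memory_files_py_alt values = pvNub (values.flatMap pvCand) := by
  induction values with
  | nil => simp [expand_recent_memory_files_py_alt, pvNub]
  | cons raw rest ih =>
    unfold expand_recent_memory_files_py_alt at ih ⊢
    simp only [List.foldr_cons, List.flatMap_cons, ih]
    by_cases h : PySem.Chars.strip raw.toList = []
    · simp [pvCand, h, PySem.Str.strip]
    · by_cases hs : PySem.Chars.isIn ['/'] (PySem.Chars.strip raw.toList) = true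
      · simp [pvCand, h, hs, pvNub, PySem.Str.isIn, PySem.Str.strip, String.ext_iff]
      · have hne : ¬ ('m'::'e'::'m'::'o'::'r'::'y'::'/'::(PySem.Chars.strip raw.toList)
            = PySem.Chars.strip raw.toList) := fun hq => by
              have hl := congrArg List.length hq; simp at hl; omega
        simp [pvCand, h, hs, pvNub, PySem.Str.isIn, PySem.Str.strip, String.ext_iff, hne,
          List.filter_filter]

-- ===== VERDICT (by name: the statement is the Claim_ definition above) =====
theorem expand_recent_memory_files_py_spec : Claim_equal_expand_recent_memory_files_py := by
  intro values _
  unfold Spec_expand_recent_memory_files_py expand_recent_memory_files_py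
  rw [pv_B]
  have h := pv_outer values PySem.Set.empty
  simp only [PySem.Set.empty] at h ⊢
  rw [h]
  rw [pv_update_nub]
  simp
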